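-- pv_equiv track=rewrite | github.com/ImGeuntae/CodingTest | 프로그래머스/4/1843. 사칙연산/사칙연산.py | solution
-- ===== SOURCE A (Python) =====
-- def solution(arr):
--     summax = summin = s = 0
--     for i in range(len(arr)-2, -1, -2):
--         if arr[i] == "+":
--             s += int(arr[i+1])
--         else:
--             summax = max(-int(arr[i+1])-s-summin, -int(arr[i+1])+s+summax)
--             summin -= (int(arr[i+1]) + s)
--             s = 0
--     return int(arr[0]) + s + summax
-- ===== SOURCE B (Python) =====
-- def solution(arr):
--     # Pair the tokens into (operator, operand) pairs from the right (for an
--     # even-length list arr[0] doubles as the first operator, as in A); arr[0]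
--     # always supplies the base value.  Then compute the result in closed form:
--     # split at the '-' operators into groups, keeping each group's leading
--     # operand and the sum of its '+'-chained tail; the answer is
--     # base + total - 2 * (the best prefix one chooses to negate).
--     it = iter(arr[len(arr) % 2:])
--     first = int(arr[0])          # base value; running sum of the leading '+' group
--     groups = []                  # [(leading operand, tail sum)] per '-' group
--     for op, x in zip(it, it):
--         if op == "+":
--             if groups:
--                 lead, tail = groups[-1]
--                 groups[-1] = (lead, tail + int(x))
--             else:
--                 first += int(x)
--         else:
--             groups.append((int(x), 0))
--     if not groups:
--         return first
--     total = sum(lead + tail for lead, tail in groups)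
--     run = 0                      # prefix sum of the leading operands
--     lowest = None
--     for lead, tail in groups:
--         run += lead
--         cand = run + tail
--         if lowest is None or cand < lowest:
--             lowest = cand
--     if run < lowest:             # negate every group (never 'stop')
--         lowest = run
--     return first + total - 2 * lowest
-- ===== Notes on version B (the rewrite author's own statement) =====
-- stated objective: alternative
-- what changed: B replaces A's single backward scan that couples three running accumulators (summax/summin/s) by a forward parse of the token pairs into '-'-separated groups (keeping each group's leading operand and tail sum) followed by a min-prefix scan, returning first + total - 2*min over the closed-form candidates; same O(n) cost.
import Mathlib
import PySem

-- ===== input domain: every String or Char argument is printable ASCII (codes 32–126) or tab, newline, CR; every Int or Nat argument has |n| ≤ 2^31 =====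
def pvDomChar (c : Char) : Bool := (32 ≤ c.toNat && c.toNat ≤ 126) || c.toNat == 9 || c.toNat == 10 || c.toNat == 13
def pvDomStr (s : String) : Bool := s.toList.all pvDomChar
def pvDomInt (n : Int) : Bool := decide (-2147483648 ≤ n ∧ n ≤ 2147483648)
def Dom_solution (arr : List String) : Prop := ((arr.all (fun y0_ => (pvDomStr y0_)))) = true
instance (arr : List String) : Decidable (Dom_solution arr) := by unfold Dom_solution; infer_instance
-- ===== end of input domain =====

-- B replaces A's backward scan with three coupled running extremes by a forward parse into
-- '-'-separated groups followed by a min-prefix scan in closed form (objective: alternative, same O(n) cost).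

-- int(s), defaulted; under Pre_ every parsed position parses, so the default is never used
def pyInt (s : String) : Int := (PySem.Int.ofStr? s).getD 0

-- ===== PORT A =====
-- the body of A's for-loop, reading arr[i] and arr[i+1]
def stepA (arr : List String) (st : Int × Int × Int) (i : Int) : Int × Int × Int :=
  if PySem.List.pyGetD arr i "" = "+" then
    (st.1, st.2.1, st.2.2 + pyInt (PySem.List.pyGetD arr (i + 1) ""))
  else
    (max (-(pyInt (PySem.List.pyGetD arr (i + 1) "")) - st.2.2 - st.2.1)
         (-(pyInt (PySem.List.pyGetD arr (i + 1) "")) + st.2.2 + st.1),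
     st.2.1 - (pyInt (PySem.List.pyGetD arr (i + 1) "") + st.2.2), 0)

def solution (arr : List String) : Int :=
  let st := (PySem.List.pyRange ((arr.length : Int) - 2) (-1) (-2)).foldl (stepA arr) (0, 0, 0)
  pyInt (PySem.List.pyGetD arr 0 "") + st.2.2 + st.1

-- ===== PORT B =====
-- zip(it, it) over arr[1:]: consecutive (operator, operand) pairs
def pairsOf : List String → List (String × String)
  | a :: b :: t => (a, b) :: pairsOf t
  | _ => []

-- loop body building (first, groups): groups holds (leading operand, tail sum) per '-' group
def stepB (st : Int × List (Int × Int)) (p : String × String) : Int × List (Int × Int) :=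
  if p.1 = "+" then
    if st.2.isEmpty then (st.1 + pyInt p.2, st.2)
    else (st.1, st.2.dropLast ++ [((st.2.getLastD (0, 0)).1, (st.2.getLastD (0, 0)).2 + pyInt p.2)])
  else (st.1, st.2 ++ [(pyInt p.2, 0)])

-- loop body of the min-prefix scan: (run, lowest)
def stepScan (q : Int × Option Int) (g : Int × Int) : Int × Option Int :=
  let run := q.1 + g.1
  let cand := run + g.2
  (run, match q.2 with
        | none => some cand
        | some m => if cand < m then some cand else some m)

def solution_alt (arr : List String) : Int :=
  let first := pyInt (PySem.List.pyGetD arr 0 "")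
  let st := (pairsOf (PySem.List.slice arr (some ((arr.length : Int) % 2)) none)).foldl stepB (first, [])
  if st.2.isEmpty then st.1
  else
    let total := (st.2.map (fun g => g.1 + g.2)).sum
    let fin := st.2.foldl stepScan (0, none)
    let lowest := fin.2.getD 0
    let lowest := if fin.1 < lowest then fin.1 else lowest
    st.1 + total - 2 * lowest

-- ===== PRECONDITION & SPEC =====
-- Pre_ is exactly where A returns: arr[0] and every operand position that A's loop int()s
-- (positions of parity opposite to len(arr)'s) must parse as Python ints; else A raises
-- ValueError (or IndexError on []).  The ports agree on ALL inputs (both default a failed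
-- parse to 0 identically), so the proof below does not need Pre_; it only delimits A's domain.
def Pre_solution (arr : List String) : Prop :=
  (PySem.Int.ofStr? (arr.getD 0 "")).isSome = true ∧
  ∀ i, i < arr.length → i % 2 ≠ arr.length % 2 →
    (PySem.Int.ofStr? (arr.getD i "")).isSome = true

instance (arr : List String) : Decidable (Pre_solution arr) := by unfold Pre_solution; infer_instance

def pvWitness_solution : List String := ["1", "+", "2", "-", "3"]

def Spec_solution (arr : List String) (out : Int) : Prop := out = solution_alt arr
instance (arr : List String) (out : Int) : Decidable (Spec_solution arr out) := by
  unfold Spec_solution; infer_instance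

-- ===== CLAIM (what is proved, stated in full; the proofs are below) =====
def Claim_equal_solution : Prop :=
  ∀ (arr : List String), Dom_solution arr → Pre_solution arr → Spec_solution arr (solution arr)

-- ===== LEMMAS AND PROOFS =====

-- pairs flattened back to the token list
def flat : List (String × String) → List String
  | [] => []
  | p :: P => p.1 :: p.2 :: flat P

lemma length_flat : ∀ P : List (String × String), (flat P).length = 2 * P.length
  | [] => rfl
  | _ :: P => by simp [flat, length_flat P]; omega

lemma flat_pairsOf : ∀ l : List String, l.length % 2 = 0 → flat (pairsOf l) = l
  | [], _ => rfl
  | [a], h => by simp at h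
  | a :: b :: t, h => by
      simp only [pairsOf, flat, List.cons.injEq, true_and]
      exact flat_pairsOf t (by simp [List.length_cons] at h; omega)

lemma flat_append (P Q : List (String × String)) : flat (P ++ Q) = flat P ++ flat Q := by
  induction P with
  | nil => rfl
  | cons p P ih => simp [flat, ih]

-- A's loop body as a function of the (operator, operand) pair
def stepPair (p : String × String) (st : Int × Int × Int) : Int × Int × Int :=
  if p.1 = "+" then (st.1, st.2.1, st.2.2 + pyInt p.2)
  else (max (-(pyInt p.2) - st.2.2 - st.2.1) (-(pyInt p.2) + st.2.2 + st.1),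
        st.2.1 - (pyInt p.2 + st.2.2), 0)

-- semantic view of the token pairs: leading '+'-run sum and the '-'-groups (lead, tail)
def sA : List (String × String) → Int
  | [] => 0
  | p :: P => if p.1 = "+" then pyInt p.2 + sA P else 0

def Gr : List (String × String) → List (Int × Int)
  | [] => []
  | p :: P => if p.1 = "+" then Gr P else (pyInt p.2, sA P) :: Gr P

def totalG (gs : List (Int × Int)) : Int := (gs.map (fun g => g.1 + g.2)).sum

def X (gs : List (Int × Int)) : Int := (gs.map Prod.fst).sum

-- the value A's summax holds, characterised recursively over the groups
def MA : List (Int × Int) → Int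
  | [] => 0
  | g :: gs => -(g.1 + g.2) + max (totalG gs) (MA gs + 2 * g.2)

-- the minimum B's scan computes over nonempty group prefixes
def mc : List (Int × Int) → Int
  | [] => 0
  | [g] => g.1 + g.2
  | g :: gs => min (g.1 + g.2) (g.1 + mc gs)

lemma pyRange_norm (a : Int) :
    PySem.List.pyRange a (-1) (-2)
      = (List.range ((a + 2) / 2).toNat).map (fun k : Nat => a - 2 * (k : Int)) := by
  simp only [PySem.List.pyRange]
  rw [if_neg (by norm_num : ¬((-2 : Int) = 0)), if_neg (by norm_num : ¬(0 < (-2 : Int)))]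
  by_cases ha : (-1 : Int) < a
  · rw [if_pos ha]
    have e1 : a - -1 + - -2 - 1 = a + 2 := by ring
    have e2 : (- -2 : Int) = 2 := by norm_num
    rw [e1, e2]
    apply List.map_congr_left; intro j _; ring
  · rw [if_neg ha]
    have h1 : ((a + 2) / 2).toNat = 0 := by omega
    rw [h1]; rfl

lemma pyRange_cons (a : Int) (ha : 0 ≤ a) :
    PySem.List.pyRange a (-1) (-2) = a :: PySem.List.pyRange (a - 2) (-1) (-2) := by
  rw [pyRange_norm a, pyRange_norm (a - 2)]
  have hc : ((a + 2) / 2).toNat = ((a - 2 + 2) / 2).toNat + 1 := by omega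
  rw [hc, List.range_succ_eq_map]
  simp only [List.map_cons, List.map_map]
  congr 1
  · norm_num
  · apply List.map_congr_left; intro k _
    simp only [Function.comp_apply]; push_cast; ring

lemma mem_pyRange_neg2 (a i : Int)
    (h : i ∈ PySem.List.pyRange a (-1) (-2)) : 0 ≤ i ∧ i ≤ a := by
  rw [pyRange_norm] at h
  simp only [List.mem_map] at h
  obtain ⟨k, hk, hki⟩ := h
  have hk' : k < ((a + 2) / 2).toNat := List.mem_range.mp hk
  try simp only at hki
  omega

lemma pyGetD_prefix {u v : List String} {i : Int} (d : String) (h0 : 0 ≤ i)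
    (h : i < (u.length : Int)) : PySem.List.pyGetD (u ++ v) i d = PySem.List.pyGetD u i d := by
  rw [PySem.List.pyGetD_eq_getElem _ d h0 (by simp; omega),
      PySem.List.pyGetD_eq_getElem _ d h0 h]
  rw [List.getElem_append_left (by omega)]

-- A's indexed backward loop over pre0 ++ flat P (pre0 the unpaired leading token, if any)
-- is the right fold of stepPair over P
lemma loopA_eq (P : List (String × String)) : ∀ (pre0 : List String) (init : Int × Int × Int),
    pre0.length ≤ 1 →
    (PySem.List.pyRange ((pre0.length : Int) + 2 * (P.length : Int) - 2) (-1) (-2)).foldl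
        (stepA (pre0 ++ flat P)) init
      = List.foldr stepPair init P := by
  induction P using List.reverseRecOn with
  | nil =>
    intro pre0 init hpre0
    rw [pyRange_norm]
    have h0 : (((pre0.length : Int) + 2 * (([] : List (String × String)).length : Int) - 2 + 2) / 2).toNat
        = 0 := by
      simp only [List.length_nil]
      omega
    rw [h0]
    simp
  | append_singleton P p ih =>
    intro pre0 init hpre0
    have hlen : ((P ++ [p]).length : Int) = (P.length : Int) + 1 := by simp
    have hstart : (pre0.length : Int) + 2 * ((P ++ [p]).length : Int) - 2
        = (pre0.length : Int) + 2 * (P.length : Int) := by rw [hlen]; ring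
    rw [hstart, pyRange_cons _ (by positivity)]
    obtain ⟨u, hu⟩ : ∃ u, pre0 ++ flat P = u := ⟨_, rfl⟩
    have harr : pre0 ++ flat (P ++ [p]) = u ++ [p.1, p.2] := by
      rw [← hu]
      simp [flat_append, flat, List.append_assoc]
    have hlenu : ((u.length : Int)) = (pre0.length : Int) + 2 * (P.length : Int) := by
      rw [← hu]
      simp [length_flat]
    have hfirst : stepA (pre0 ++ flat (P ++ [p])) init ((pre0.length : Int) + 2 * (P.length : Int))
        = stepPair p init := by
      rw [harr, stepA, ← hlenu]
      have hg1 : PySem.List.pyGetD (u ++ [p.1, p.2])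
          ((u.length : Int)) "" = p.1 := by
        rw [PySem.List.pyGetD_natCast]
        simp
      have hg2 : PySem.List.pyGetD (u ++ [p.1, p.2])
          (((u.length : Int)) + 1) "" = p.2 := by
        rw [show ((u.length : Int)) + 1 = ((u.length + 1 : Nat) : Int) by push_cast; ring]
        rw [PySem.List.pyGetD_natCast]
        simp
      rw [hg1, hg2, stepPair]
    rw [List.foldl_cons, hfirst]
    have hcongr : (PySem.List.pyRange ((pre0.length : Int) + 2 * (P.length : Int) - 2) (-1) (-2)).foldl
          (stepA (pre0 ++ flat (P ++ [p]))) (stepPair p init)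
        = (PySem.List.pyRange ((pre0.length : Int) + 2 * (P.length : Int) - 2) (-1) (-2)).foldl
          (stepA u) (stepPair p init) := by
      apply PySem.List.foldl_congr_mem
      intro acc i hi
      obtain ⟨h0, h1⟩ := mem_pyRange_neg2 _ i hi
      rw [harr]
      unfold stepA
      rw [pyGetD_prefix "" h0 (by rw [hlenu]; omega),
          pyGetD_prefix "" (by omega) (by rw [hlenu]; omega)]
    rw [hcongr, ← hu, ih pre0 (stepPair p init) hpre0, List.foldr_append, List.foldr_cons,
      List.foldr_nil]

-- pairing the flattened pairs back
lemma pairsOf_flat : ∀ P : List (String × String), pairsOf (flat P) = P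
  | [] => rfl
  | p :: P => by simp [flat, pairsOf, pairsOf_flat P]

-- the fold of stepPair computes (summax, summin, s) = (MA groups, -total, plus-run)
lemma foldr_stepPair (P : List (String × String)) :
    List.foldr stepPair (0, 0, 0) P = (MA (Gr P), -(totalG (Gr P)), sA P) := by
  induction P with
  | nil => simp [MA, totalG, sA, Gr]
  | cons p P ih =>
    rw [List.foldr_cons, ih, stepPair, sA, Gr]
    by_cases hp : p.1 = "+"
    · rw [if_pos hp, if_pos hp, if_pos hp]
      simp [add_comm]
    · rw [if_neg hp, if_neg hp, if_neg hp]
      have htot : totalG ((pyInt p.2, sA P) :: Gr P) = (pyInt p.2 + sA P) + totalG (Gr P) := by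
        simp [totalG]
      rw [MA, htot]
      simp only [Prod.mk.injEq]
      and_intros <;> first | omega | rfl | trivial

-- B's building loop: from (f, acc ++ [(l,t)]) the '+'-run joins the last tail
lemma foldl_stepB_ne (P : List (String × String)) :
    ∀ (f l t : Int) (acc : List (Int × Int)),
    List.foldl stepB (f, acc ++ [(l, t)]) P = (f, acc ++ [(l, t + sA P)] ++ Gr P) := by
  induction P with
  | nil => intro f l t acc; simp [sA, Gr]
  | cons p P ih =>
    intro f l t acc
    rw [List.foldl_cons, stepB, sA, Gr]
    by_cases hp : p.1 = "+"
    · rw [if_pos hp, if_pos hp, if_pos hp]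
      have hne : ((f, acc ++ [(l, t)]).2).isEmpty = false := by simp
      rw [hne]
      simp only [Bool.false_eq_true, if_false]
      have h1 : ((f, acc ++ [(l, t)]).2).dropLast = acc := by simp
      have h2 : ((f, acc ++ [(l, t)]).2).getLastD (0, 0) = (l, t) := by simp
      rw [h1, h2]
      rw [ih f l (t + pyInt p.2) acc]
      simp [add_assoc]
    · rw [if_neg hp, if_neg hp, if_neg hp]
      have hacc : (f, acc ++ [(l, t)]).2 ++ [(pyInt p.2, 0)]
          = (acc ++ [(l, t)]) ++ [(pyInt p.2, 0)] := by simp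
      rw [hacc, ih f (pyInt p.2) 0 (acc ++ [(l, t)])]
      simp

lemma foldl_stepB_nil (P : List (String × String)) : ∀ f : Int,
    List.foldl stepB (f, []) P = (f + sA P, Gr P) := by
  induction P with
  | nil => intro f; simp [sA, Gr]
  | cons p P ih =>
    intro f
    rw [List.foldl_cons, stepB, sA, Gr]
    by_cases hp : p.1 = "+"
    · rw [if_pos hp, if_pos hp, if_pos hp]
      simp only [List.isEmpty_nil, if_true]
      rw [ih (f + pyInt p.2)]
      simp [add_assoc]
    · rw [if_neg hp, if_neg hp, if_neg hp]
      have hacc : ((f, ([] : List (Int × Int))).2) ++ [(pyInt p.2, 0)] = [] ++ [(pyInt p.2, 0)] := rfl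
      rw [hacc, foldl_stepB_ne P f (pyInt p.2) 0 []]
      simp

-- B's scanning loop with a live minimum
lemma stepScan_some (r m : Int) (g : Int × Int) :
    stepScan (r, some m) g = (r + g.1, some (min m (r + g.1 + g.2))) := by
  show (r + g.1, if r + g.1 + g.2 < m then some (r + g.1 + g.2) else some m) = _
  split_ifs with h <;> simp <;> omega

lemma foldl_stepScan_some (gs : List (Int × Int)) : ∀ (r m : Int),
    List.foldl stepScan (r, some m) gs
      = (r + X gs, some (if gs.isEmpty then m else min m (r + mc gs))) := by
  induction gs with
  | nil => intro r m; simp [X]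
  | cons g gs ih =>
    intro r m
    rw [List.foldl_cons, stepScan_some, ih]
    cases gs with
    | nil =>
      simp only [List.isEmpty_nil, if_true, List.isEmpty_cons, Bool.false_eq_true, if_false]
      simp only [Prod.mk.injEq, Option.some.injEq, X, mc, List.map_cons, List.map_nil,
        List.sum_cons, List.sum_nil]
      and_intros <;> omega
    | cons g' gs' =>
      simp only [List.isEmpty_cons, Bool.false_eq_true, if_false]
      have hmc : mc (g :: g' :: gs') = min (g.1 + g.2) (g.1 + mc (g' :: gs')) := rfl
      have hX : X (g :: g' :: gs') = g.1 + X (g' :: gs') := by simp [X]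
      rw [hmc, hX]
      simp only [Prod.mk.injEq, Option.some.injEq]
      and_intros <;> omega

lemma foldl_stepScan_none (g : Int × Int) (gs : List (Int × Int)) :
    List.foldl stepScan (0, none) (g :: gs) = (X (g :: gs), some (mc (g :: gs))) := by
  rw [List.foldl_cons]
  have h0 : stepScan (0, none) g = (0 + g.1, some (0 + g.1 + g.2)) := rfl
  rw [h0, foldl_stepScan_some]
  cases gs with
  | nil => simp [X, mc]
  | cons g' gs' =>
    simp only [List.isEmpty_cons, Bool.false_eq_true, if_false]
    have hmc : mc (g :: g' :: gs') = min (g.1 + g.2) (g.1 + mc (g' :: gs')) := rfl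
    have hX : X (g :: g' :: gs') = g.1 + X (g' :: gs') := by simp [X]
    rw [hmc, hX]
    simp only [Prod.mk.injEq, Option.some.injEq]
    refine ⟨by ring, by omega⟩

-- the closed form B computes equals the value A's summax accumulates
lemma MA_eq_minLow : ∀ gs : List (Int × Int), gs ≠ [] →
    MA gs = totalG gs - 2 * min (mc gs) (X gs)
  | [], h => absurd rfl h
  | [g], _ => by
      simp only [MA, totalG, mc, X, List.map_cons, List.map_nil, List.sum_cons, List.sum_nil]
      omega
  | g :: g' :: gs, _ => by
      have ih := MA_eq_minLow (g' :: gs) (by simp)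
      have hmc : mc (g :: g' :: gs) = min (g.1 + g.2) (g.1 + mc (g' :: gs)) := rfl
      have hX : X (g :: g' :: gs) = g.1 + X (g' :: gs) := by simp [X]
      have ht : totalG (g :: g' :: gs) = (g.1 + g.2) + totalG (g' :: gs) := by simp [totalG]
      rw [MA, hmc, hX, ht, ih]
      omega

-- the shared assembly: arr split as an optional unpaired leading token and the pair list
lemma assemble (arr pre0 : List String) (P : List (String × String))
    (hpre0 : pre0.length ≤ 1) (harr : arr = pre0 ++ flat P)
    (hmod : arr.length % 2 = pre0.length) : solution arr = solution_alt arr := by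
  subst harr
  have hA : solution (pre0 ++ flat P)
      = pyInt (PySem.List.pyGetD (pre0 ++ flat P) 0 "") + sA P + MA (Gr P) := by
    unfold solution
    have hlen : (((pre0 ++ flat P).length : Int)) - 2
        = (pre0.length : Int) + 2 * (P.length : Int) - 2 := by
      simp [length_flat]
    rw [hlen, loopA_eq P pre0 (0, 0, 0) hpre0, foldr_stepPair]
  have hslice : PySem.List.slice (pre0 ++ flat P)
      (some (((pre0 ++ flat P).length : Int) % 2)) none = flat P := by
    have hm : (((pre0 ++ flat P).length : Int)) % 2 = ((pre0.length : Nat) : Int) := by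
      have := hmod
      omega
    rw [hm, PySem.List.slice_from_natCast, List.drop_left]
  rw [hA]
  unfold solution_alt
  rw [hslice, pairsOf_flat]
  simp only [foldl_stepB_nil]
  cases hgs : Gr P with
  | nil => simp [MA]
  | cons g gs =>
    simp only [List.isEmpty_cons, Bool.false_eq_true, if_false,
      foldl_stepScan_none, Option.getD_some]
    have hMA := MA_eq_minLow (g :: gs) (by simp)
    have htot : ((g :: gs).map (fun g => g.1 + g.2)).sum = totalG (g :: gs) := rfl
    rw [htot, hMA]
    have hmin : (if X (g :: gs) < mc (g :: gs) then X (g :: gs) else mc (g :: gs))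
        = min (mc (g :: gs)) (X (g :: gs)) := by omega
    rw [hmin]
    ring

-- ===== VERDICT (by name: the statement is the Claim_ definition above) =====
theorem solution_spec : Claim_equal_solution := by
  intro arr _ _
  unfold Spec_solution
  rcases Nat.mod_two_eq_zero_or_one arr.length with hpar | hpar
  · exact assemble arr [] (pairsOf arr)
      (by simp) (by simp [flat_pairsOf arr hpar]) (by simp [hpar])
  · obtain ⟨x0, rest, rfl⟩ : ∃ x0 rest, arr = x0 :: rest := by
      cases arr with
      | nil => simp at hpar
      | cons a t => exact ⟨a, t, rfl⟩
    have hrest : rest.length % 2 = 0 := by simp [List.length_cons] at hpar; omega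
    exact assemble (x0 :: rest) [x0] (pairsOf rest)
      (by simp) (by simp [flat_pairsOf rest hrest]) (by simp [List.length_cons]; omega)
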